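-- pv_equiv track=rewrite | github.com/pmoracho/pboletin | PdfProcessor.py | conectar_verticales
-- ===== SOURCE A (Python) =====
-- def conectar_verticales(mylista, level=50):
--
-- 	newlist = mylista[:]
--
-- 	verticales = [l for l in mylista if l[0] == l[2]]
-- 	horizontales = [l for l in mylista if l[1] == l[3]]
--
-- 	yvert = {}
-- 	for i in [l[1] for l in horizontales]:
-- 		for j in range(0, level):
-- 			yvert[i+j] = i
-- 			yvert[i-j] = i
--
-- 	for i,l in enumerate(verticales):
-- 		verticales[i][1] = yvert.get(verticales[i][1],verticales[i][1])
-- 		verticales[i][3] = yvert.get(verticales[i][3],verticales[i][3])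
--
-- 	return newlist
-- ===== SOURCE B (Python) =====
-- def conectar_verticales(mylista, level=50):
-- 	# Snap each vertical endpoint by scanning the horizontal y-values directly
-- 	# (last match in list order wins), instead of precomputing a dict of
-- 	# 2*level keys per horizontal. Mutates the sublists in place, like A.
-- 	hys = [l[1] for l in mylista if l[1] == l[3]]
-- 	for l in mylista:
-- 		if l[0] == l[2]:
-- 			for k in (1, 3):
-- 				v = l[k]
-- 				snapped = v
-- 				for y in hys:
-- 					if abs(v - y) <= level - 1:
-- 						snapped = y
-- 				l[k] = snapped
-- 	return mylista[:]
-- ===== Notes on version B (the rewrite author's own statement) =====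
-- stated objective: simpler
-- what changed: B drops A's precomputed yvert dict (2*level keys per horizontal) and instead snaps each vertical endpoint by scanning the horizontal y-values directly, keeping the last one within level-1 in list order.
import Mathlib
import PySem

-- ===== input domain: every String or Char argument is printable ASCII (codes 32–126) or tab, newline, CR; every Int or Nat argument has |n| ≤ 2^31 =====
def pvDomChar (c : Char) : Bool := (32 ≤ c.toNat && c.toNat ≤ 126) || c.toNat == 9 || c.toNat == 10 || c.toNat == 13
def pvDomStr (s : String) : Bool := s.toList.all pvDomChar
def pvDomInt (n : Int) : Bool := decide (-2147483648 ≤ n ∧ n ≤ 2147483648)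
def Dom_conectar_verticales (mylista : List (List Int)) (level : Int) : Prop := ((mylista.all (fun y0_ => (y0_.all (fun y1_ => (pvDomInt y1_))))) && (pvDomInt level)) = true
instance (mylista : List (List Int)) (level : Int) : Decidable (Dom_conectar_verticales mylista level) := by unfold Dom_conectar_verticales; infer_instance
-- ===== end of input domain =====

-- B replaces A's precomputed dict of 2*level snap keys per horizontal by a direct
-- scan over the horizontal y-values (last match in list order wins): simpler, no dict.
-- Both Pythons mutate mylista's sublists in place; the equivalence proved here is
-- about the RETURN value (in Python the returned shallow copy shares those sublists,
-- and both versions perform the same mutations).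

-- ===== PORT A =====
-- yvert[i+j] = i; yvert[i-j] = i  for j in range(0, level), per horizontal y-value i
def cvA_build (ys : List Int) (level : Int) : PySem.Dict Int Int :=
  ys.foldl
    (fun d i => (PySem.List.pyRange 0 level 1).foldl
      (fun d j => (d.insert (i + j) i).insert (i - j) i) d)
    PySem.Dict.empty

-- verticales[i][1] = yvert.get(...); verticales[i][3] = yvert.get(...) — Python mutates
-- the shared sublist objects, so the returned copy of mylista shows each vertical line updated.
def cvA_upd (yvert : PySem.Dict Int Int) (l : List Int) : List Int :=
  let v1 := PySem.List.pyGetD l 1 0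
  let l1 := PySem.List.pySetD l 1 (yvert.getD v1 v1)
  let v3 := PySem.List.pyGetD l1 3 0
  PySem.List.pySetD l1 3 (yvert.getD v3 v3)

def conectar_verticales (mylista : List (List Int)) (level : Int) : List (List Int) :=
  let horizontales := mylista.filter (fun l => PySem.List.pyGetD l 1 0 == PySem.List.pyGetD l 3 0)
  let yvert := cvA_build (horizontales.map (fun l => PySem.List.pyGetD l 1 0)) level
  mylista.map (fun l =>
    if PySem.List.pyGetD l 0 0 == PySem.List.pyGetD l 2 0 then cvA_upd yvert l else l)

-- ===== PORT B =====
-- snapped = v; for y in hys: if abs(v - y) <= level - 1: snapped = y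
def cvB_snap (hys : List Int) (level v : Int) : Int :=
  hys.foldl (fun s y => if |v - y| ≤ level - 1 then y else s) v

def conectar_verticales_alt (mylista : List (List Int)) (level : Int) : List (List Int) :=
  let hys := (mylista.filter (fun l => PySem.List.pyGetD l 1 0 == PySem.List.pyGetD l 3 0)).map
    (fun l => PySem.List.pyGetD l 1 0)
  mylista.map (fun l =>
    if PySem.List.pyGetD l 0 0 == PySem.List.pyGetD l 2 0 then
      let l1 := PySem.List.pySetD l 1 (cvB_snap hys level (PySem.List.pyGetD l 1 0))
      PySem.List.pySetD l1 3 (cvB_snap hys level (PySem.List.pyGetD l1 3 0))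
    else l)

-- ===== PRECONDITION & SPEC =====
-- Pre_ excludes exactly the inputs where A raises IndexError: a sublist with fewer
-- than 4 elements (the comprehensions/updates access l[0..3]).
def Pre_conectar_verticales (mylista : List (List Int)) (level : Int) : Prop :=
  ∀ l ∈ mylista, 4 ≤ l.length

instance (mylista : List (List Int)) (level : Int) : Decidable (Pre_conectar_verticales mylista level) := by
  unfold Pre_conectar_verticales; infer_instance

def pvWitness_conectar_verticales : List (List Int) × Int := ([[0, 0, 0, 5], [0, 2, 3, 2]], 2)

def Spec_conectar_verticales (mylista : List (List Int)) (level : Int) (out : List (List Int)) : Prop := out = conectar_verticales_alt mylista level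
instance (mylista : List (List Int)) (level : Int) (out : List (List Int)) : Decidable (Spec_conectar_verticales mylista level out) := by unfold Spec_conectar_verticales; infer_instance

-- ===== CLAIM (what is proved, stated in full; the proofs are below) =====
def Claim_equal_conectar_verticales : Prop := ∀ (mylista : List (List Int)) (level : Int), Dom_conectar_verticales mylista level → Pre_conectar_verticales mylista level → Spec_conectar_verticales mylista level (conectar_verticales mylista level)

-- ===== LEMMAS AND PROOFS =====

-- the inner 'for j' loop: lookup after inserting i±j ↦ i for all j ∈ js
theorem cvA_inner_getD (js : List Int) (d : PySem.Dict Int Int) (i v : Int) :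
    (js.foldl (fun d j => (d.insert (i + j) i).insert (i - j) i) d).getD v v
      = if (∃ j ∈ js, v = i + j ∨ v = i - j) then i else d.getD v v := by
  induction js generalizing d with
  | nil => simp
  | cons j js ih =>
      simp only [List.foldl_cons, ih, PySem.Dict.getD_insert]
      by_cases h1 : ∃ j' ∈ js, v = i + j' ∨ v = i - j'
      · rw [if_pos h1, if_pos (by obtain ⟨j', hj', h⟩ := h1; exact ⟨j', List.mem_cons_of_mem _ hj', h⟩)]
      · rw [if_neg h1]
        by_cases h2 : v = i - j
        · rw [if_pos h2, if_pos ⟨j, by simp, Or.inr h2⟩]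
        · rw [if_neg h2]
          by_cases h3 : v = i + j
          · rw [if_pos h3, if_pos ⟨j, by simp, Or.inl h3⟩]
          · rw [if_neg h3, if_neg ?_]
            rintro ⟨j', hj', h⟩
            rcases List.mem_cons.1 hj' with rfl | hj'
            · tauto
            · exact h1 ⟨j', hj', h⟩

-- range membership characterises the snap band
theorem cvA_band (level i v : Int) :
    (∃ j ∈ PySem.List.pyRange 0 level 1, v = i + j ∨ v = i - j) ↔ |v - i| ≤ level - 1 := by
  constructor
  · rintro ⟨j, hj, h | h⟩ <;> rw [PySem.List.mem_pyRange_one] at hj <;>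
      rw [abs_le] <;> omega
  · intro h
    rw [abs_le] at h
    rcases le_total i v with h' | h'
    · exact ⟨v - i, by rw [PySem.List.mem_pyRange_one]; omega, Or.inl (by ring)⟩
    · exact ⟨i - v, by rw [PySem.List.mem_pyRange_one]; omega, Or.inr (by ring)⟩

-- the dict lookup equals B's direct scan
theorem cvA_build_getD (ys : List Int) (level v : Int) :
    (cvA_build ys level).getD v v = cvB_snap ys level v := by
  suffices h : ∀ d : PySem.Dict Int Int,
      ((ys.foldl
        (fun d i => (PySem.List.pyRange 0 level 1).foldl
          (fun d j => (d.insert (i + j) i).insert (i - j) i) d) d).getD v v)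
        = ys.foldl (fun s y => if |v - y| ≤ level - 1 then y else s) (d.getD v v) by
    simpa [cvA_build, cvB_snap] using h PySem.Dict.empty
  induction ys with
  | nil => intro d; simp
  | cons y ys ih =>
      intro d
      simp only [List.foldl_cons, ih, cvA_inner_getD, cvA_band]

-- ===== VERDICT (by name: the statement is the Claim_ definition above) =====
theorem conectar_verticales_spec : Claim_equal_conectar_verticales := by
  intro mylista level _ _
  unfold Spec_conectar_verticales conectar_verticales conectar_verticales_alt
  simp only [cvA_upd]
  refine List.map_congr_left ?_
  intro l _
  split_ifs with h
  · simp only [cvA_build_getD]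
  · rfl
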